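-- pv_equiv track=rewrite | github.com/Patxi91/CodeWars_Cloud | 6kyu-Simple Fun #151 Rocks-Patxi.py | rocks
-- ===== SOURCE A (Python) =====
-- def rocks(n):
--     cost = 0
--     digits = 1
--     while n > 0:
--         if n >= 10 ** digits:
--             cost += 9 * 10 ** (digits - 1) * digits
--             digits += 1
--         else:
--             cost += (n - 10 ** (digits - 1) + 1) * digits
--             n = 0
--     return cost
-- ===== SOURCE B (Python) =====
-- def rocks(n):
--     total = 0
--     p = 1
--     while p <= n:
--         total += n - p + 1
--         p *= 10
--     return total
-- ===== Notes on version B (the rewrite author's own statement) =====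
-- stated objective: simpler
-- what changed: B replaces A's digit-count bookkeeping (complete 9*10^(d-1)*d blocks plus a partial last block, with a digits counter and a branch) with column-wise counting: for each power of ten p <= n it adds n-p+1, the count of integers in 1..n with at least that many digits.
import Mathlib
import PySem

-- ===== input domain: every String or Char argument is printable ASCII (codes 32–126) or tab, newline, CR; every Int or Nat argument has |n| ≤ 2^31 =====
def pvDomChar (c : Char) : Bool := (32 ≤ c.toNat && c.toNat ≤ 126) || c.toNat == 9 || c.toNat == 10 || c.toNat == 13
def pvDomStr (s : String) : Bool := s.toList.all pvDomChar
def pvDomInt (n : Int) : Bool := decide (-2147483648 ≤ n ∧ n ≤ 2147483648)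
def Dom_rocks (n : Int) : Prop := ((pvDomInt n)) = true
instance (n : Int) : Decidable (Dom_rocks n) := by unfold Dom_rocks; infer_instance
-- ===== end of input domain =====

-- B replaces A's block-by-block accumulation (complete 9·10^(d-1)·d blocks plus a partial last
-- block) with column-wise counting: for each power p = 1,10,100,… ≤ n it adds n−p+1, the number
-- of integers in 1..n with at least that many digits.  Objective: simpler (same O(log n) cost).

-- ===== PORT A =====
-- A's while loop; `digits` starts at 1 and only increments, the 1 ≤ digits invariant is carried
-- as a proof argument only to justify termination — the computation is A's, step for step.
def rocksLoop (n cost digits : Int) (hd : 1 ≤ digits) : Int :=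
  if _h : n > 0 then
    if h2 : n ≥ 10 ^ digits.toNat then
      rocksLoop n (cost + 9 * 10 ^ (digits - 1).toNat * digits) (digits + 1) (by omega)
    else
      cost + (n - 10 ^ (digits - 1).toNat + 1) * digits
  else cost
termination_by (n.toNat + 1 - digits.toNat)
decreasing_by
  have h3 : digits.toNat < 10 ^ digits.toNat := Nat.lt_pow_self (by norm_num)
  have h4 : ((10:Int) ^ digits.toNat) = ((10 ^ digits.toNat : Nat) : Int) := by push_cast; ring
  omega

def rocks (n : Int) : Int := rocksLoop n 0 1 (by norm_num)

-- ===== PORT B =====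
-- B's while loop; 0 < p is carried as a proof argument only to justify termination.
def rocksAltLoop (n total p : Int) (hp : 0 < p) : Int :=
  if h : p ≤ n then rocksAltLoop n (total + (n - p + 1)) (10 * p) (by omega) else total
termination_by (n + 1 - p).toNat

def rocks_alt (n : Int) : Int := rocksAltLoop n 0 1 (by norm_num)

-- ===== PRECONDITION & SPEC =====
def Spec_rocks (n : Int) (out : Int) : Prop := out = rocks_alt n
instance (n : Int) (out : Int) : Decidable (Spec_rocks n out) := by unfold Spec_rocks; infer_instance

-- ===== CLAIM (what is proved, stated in full; the proofs are below) =====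
def Claim_equal_rocks : Prop := ∀ (n : Int), Dom_rocks n → Spec_rocks n (rocks n)

-- ===== LEMMAS AND PROOFS =====

-- B's accumulator is a plain running sum.
theorem rocksAltLoop_shift (n t c p : Int) (hp : 0 < p) :
    rocksAltLoop n (t + c) p hp = rocksAltLoop n t p hp + c := by
  fun_induction rocksAltLoop n t p hp generalizing c with
  | case1 t p hp h ih =>
    rw [rocksAltLoop]
    simp only [dif_pos h]
    have he : t + c + (n - p + 1) = t + (n - p + 1) + c := by ring
    rw [he, ih]
  | case2 t p hp h =>
    rw [rocksAltLoop]
    simp only [dif_neg h]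

-- Loop correspondence: from a state with 1 ≤ d and 10^(d-1) ≤ n, A's remaining work equals
-- B's loop started at p = 10^(d-1) plus an explicit correction term.
theorem rocks_main (n cost d : Int) (hd : 1 ≤ d) :
    (10:Int) ^ (d - 1).toNat ≤ n →
    rocksLoop n cost d hd =
      cost + rocksAltLoop n 0 ((10:Int) ^ (d - 1).toNat) (by positivity)
        + (d - 1) * (n + 1) - (d - 1) * 10 ^ (d - 1).toNat := by
  fun_induction rocksLoop n cost d hd with
  | case1 cost d hd h h2 ih =>
    intro hn
    set e := (d - 1).toNat with he
    have hdt : d.toNat = e + 1 := by omega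
    have hdt2 : (d + 1 - 1).toNat = e + 1 := by omega
    rw [hdt2] at ih
    have hpow : (10:Int) ^ (e + 1) = 10 ^ e * 10 := pow_succ 10 e
    have h2' : (10:Int) ^ (e + 1) ≤ n := by rw [← hdt]; exact h2
    have := ih h2'
    rw [this]
    -- evaluate one step of B's loop from p = 10^e
    have hstep : rocksAltLoop n 0 ((10:Int) ^ e) (by positivity)
        = rocksAltLoop n 0 ((10:Int) ^ (e + 1)) (by positivity) + (n - 10 ^ e + 1) := by
      rw [rocksAltLoop]
      simp only [dif_pos hn]
      have h10 : (10:Int) * 10 ^ e = 10 ^ (e + 1) := by rw [hpow]; ring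
      have hc : (0:Int) + (n - 10 ^ e + 1) = 0 + (n - 10 ^ e + 1) := rfl
      calc rocksAltLoop n (0 + (n - 10 ^ e + 1)) (10 * 10 ^ e) (by positivity)
          = rocksAltLoop n (0 + (n - 10 ^ e + 1)) ((10:Int) ^ (e + 1)) (by positivity) := by
            congr 1
        _ = rocksAltLoop n 0 ((10:Int) ^ (e + 1)) (by positivity) + (n - 10 ^ e + 1) :=
            rocksAltLoop_shift n 0 (n - 10 ^ e + 1) _ _
    rw [hstep]
    linear_combination (-d) * hpow
  | case2 cost d hd h h2 =>
    intro hn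
    set e := (d - 1).toNat with he
    have hdt : d.toNat = e + 1 := by omega
    have h2' : n < (10:Int) ^ (e + 1) := by rw [← hdt]; omega
    have hstep : rocksAltLoop n 0 ((10:Int) ^ e) (by positivity) = n - 10 ^ e + 1 := by
      rw [rocksAltLoop]
      simp only [dif_pos hn]
      rw [rocksAltLoop]
      have hno : ¬ ((10:Int) * 10 ^ e ≤ n) := by
        have : (10:Int) ^ (e + 1) = 10 * 10 ^ e := by rw [pow_succ]; ring
        omega
      simp only [dif_neg hno]
      ring
    rw [hstep]
    ring
  | case3 cost d hd h =>
    intro hn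
    have : (0:Int) < 10 ^ (d - 1).toNat := by positivity
    omega

-- ===== VERDICT (by name: the statement is the Claim_ definition above) =====
theorem rocks_spec : Claim_equal_rocks := by
  intro n _
  show rocks n = rocks_alt n
  by_cases hn : 1 ≤ n
  · have := rocks_main n 0 1 (by norm_num) (by simpa using hn)
    simpa [rocks, rocks_alt] using this
  · rw [rocks, rocks_alt, rocksLoop, rocksAltLoop]
    simp [show ¬ (n > 0) by omega, show ¬ ((1:Int) ≤ n) from hn]
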